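-- pv_equiv track=rewrite | github.com/kalikcn/System_Monitoring | security/validators.py | validate_file_path
-- ===== SOURCE A (Python) =====
-- def validate_file_path(path: str) -> bool:
--     """验证文件路径"""
--     if not path:
--         return False
--
--     # 检查路径遍历攻击
--     if '..' in path or path.startswith('/'):
--         return False
--
--     # 检查危险字符
--     dangerous_chars = ['<', '>', ':', '"', '|', '?', '*']
--     if any(char in path for char in dangerous_chars):
--         return False
--
--     return True
-- ===== SOURCE B (Python) =====
-- def validate_file_path(path: str) -> bool:
--     """Single left-to-right scan with one character of look-behind, instead of
--     separate substring/prefix/membership passes."""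
--     if not path:
--         return False
--     if path[0] == '/':
--         return False
--     prev = ''
--     for ch in path:
--         if ch in '<>:"|?*':
--             return False
--         if ch == '.' and prev == '.':
--             return False
--         prev = ch
--     return True
-- ===== Notes on version B (the rewrite author's own statement) =====
-- stated objective: alternative
-- what changed: Replaces A's three separate whole-string passes (a double-dot substring search, a leading-slash prefix test, and a per-dangerous-character containment scan) with a single left-to-right scan that keeps one character of look-behind to detect the double dot and rejects dangerous characters in the same pass.
import Mathlib
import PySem

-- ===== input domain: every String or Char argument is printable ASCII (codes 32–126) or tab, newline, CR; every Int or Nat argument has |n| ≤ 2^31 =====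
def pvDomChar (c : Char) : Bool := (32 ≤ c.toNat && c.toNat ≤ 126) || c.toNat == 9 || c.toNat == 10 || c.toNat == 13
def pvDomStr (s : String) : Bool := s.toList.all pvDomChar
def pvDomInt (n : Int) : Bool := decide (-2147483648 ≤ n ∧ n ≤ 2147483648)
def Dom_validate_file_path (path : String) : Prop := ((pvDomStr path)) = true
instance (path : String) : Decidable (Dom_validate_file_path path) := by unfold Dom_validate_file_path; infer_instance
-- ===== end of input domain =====

-- B replaces A's three separate whole-string checks with one left-to-right scan
-- keeping a single character of look-behind (alternative decomposition, same cost).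


-- ===== PORT A =====
def validate_file_path (path : String) : Bool :=
  let cs := path.toList
  if cs.isEmpty then false
  else if PySem.Chars.isIn ['.', '.'] cs || PySem.Chars.startswith cs ['/'] then false
  else
    let dangerous : List Char := ['<', '>', ':', '"', '|', '?', '*']
    if dangerous.any (fun c => PySem.Chars.isIn [c] cs) then false
    else true

-- ===== PORT B =====
-- the loop of Source B: prevDot remembers whether the previous character was '.'
def scanSafe : List Char → Bool → Bool
  | [], _ => true
  | c :: rest, prevDot =>
    if ['<', '>', ':', '"', '|', '?', '*'].contains c then false
    else if c == '.' && prevDot then false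
    else scanSafe rest (c == '.')

def validate_file_path_alt (path : String) : Bool :=
  match path.toList with
  | [] => false
  | c :: rest => if c == '/' then false else scanSafe (c :: rest) false

-- ===== PRECONDITION & SPEC =====
def Spec_validate_file_path (path : String) (out : Bool) : Prop := out = validate_file_path_alt path
instance (path : String) (out : Bool) : Decidable (Spec_validate_file_path path out) := by unfold Spec_validate_file_path; infer_instance

-- ===== CLAIM (what is proved, stated in full; the proofs are below) =====
def Claim_equal_validate_file_path : Prop := ∀ (path : String), Dom_validate_file_path path → Spec_validate_file_path path (validate_file_path path)

-- ===== LEMMAS AND PROOFS =====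

-- double-dot detector with the same look-behind state as scanSafe
def hasDD : List Char → Bool → Bool
  | [], _ => false
  | c :: rest, prevDot => (prevDot && c == '.') || hasDD rest (c == '.')

theorem scanSafe_eq (cs : List Char) : ∀ p,
    scanSafe cs p =
      (!(cs.any (['<', '>', ':', '"', '|', '?', '*'].contains ·)) && !(hasDD cs p)) := by
  induction cs with
  | nil => intro p; simp [scanSafe, hasDD]
  | cons c rest ih =>
    intro p
    show (if ['<', '>', ':', '"', '|', '?', '*'].contains c then false
          else if c == '.' && p then false else scanSafe rest (c == '.')) = _
    rw [List.any_cons,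
      show hasDD (c :: rest) p = ((p && c == '.') || hasDD rest (c == '.')) from rfl]
    cases hd : ['<', '>', ':', '"', '|', '?', '*'].contains c
    · cases hp : (c == '.' && p)
      · have hp' : (p && c == '.') = false := by rw [Bool.and_comm]; exact hp
        rw [if_neg (by simp), if_neg (by simp), ih]
        simp only [hp', Bool.false_or]
      · have hp' : (p && c == '.') = true := by rw [Bool.and_comm]; exact hp
        rw [if_neg (by simp), if_pos (by simp)]
        simp [hp']
    · rw [if_pos (by simp)]
      simp

theorem hasDD_iff (cs : List Char) : ∀ p,
    hasDD cs p = true ↔ ((p = true ∧ ∃ t, cs = '.' :: t) ∨ ['.', '.'] <:+: cs) := by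
  induction cs with
  | nil => intro p; simp [hasDD]
  | cons c rest ih =>
    intro p
    simp only [hasDD, Bool.or_eq_true, Bool.and_eq_true, beq_iff_eq, ih]
    rw [List.infix_cons_iff]
    constructor
    · rintro (⟨hp, hc⟩ | ⟨hc, t, ht⟩ | hinf)
      · exact Or.inl ⟨hp, rest, by rw [hc]⟩
      · subst hc; subst ht
        exact Or.inr (Or.inl ⟨t, rfl⟩)
      · exact Or.inr (Or.inr hinf)
    · rintro (⟨hp, t, ht⟩ | ⟨t, ht⟩ | hinf)
      · injection ht with h1 h2
        exact Or.inl ⟨hp, h1⟩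
      · injection ht with h1 h2
        exact Or.inr (Or.inl ⟨h1.symm, t, h2.symm⟩)
      · exact Or.inr (Or.inr hinf)

theorem validate_file_path_spec : Claim_equal_validate_file_path := by
  intro path _
  unfold Spec_validate_file_path validate_file_path validate_file_path_alt
  cases h : path.toList with
  | nil => simp
  | cons c rest =>
    simp only [List.isEmpty_cons, if_false, Bool.false_eq_true]
    rw [scanSafe_eq]
    have hdd : hasDD (c :: rest) false = (PySem.Chars.isIn ['.', '.'] (c :: rest)) := by
      rcases hb : PySem.Chars.isIn ['.', '.'] (c :: rest) with _ | _
      · rcases hd2 : hasDD (c :: rest) false with _ | _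
        · rfl
        · rcases (hasDD_iff _ false).mp hd2 with ⟨hp, _⟩ | hinf
          · exact absurd hp (by simp)
          · exact absurd ((PySem.Chars.isIn_iff_infix _ _).mpr hinf) (by simp [hb])
      · exact (hasDD_iff _ false).mpr (Or.inr ((PySem.Chars.isIn_iff_infix _ _).mp hb))
    have hsw : PySem.Chars.startswith (c :: rest) ['/'] = (c == '/') := by
      simp [PySem.Chars.startswith, List.isPrefixOf, eq_comm]
    have hdan : (['<', '>', ':', '"', '|', '?', '*'].any
          (fun d => PySem.Chars.isIn [d] (c :: rest))) =
        ((c :: rest).any (['<', '>', ':', '"', '|', '?', '*'].contains ·)) := by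
      rcases hl : (c :: rest).any (['<', '>', ':', '"', '|', '?', '*'].contains ·) with _ | _
      · rcases hr : ['<', '>', ':', '"', '|', '?', '*'].any
            (fun d => PySem.Chars.isIn [d] (c :: rest)) with _ | _
        · rfl
        · rcases List.any_eq_true.mp hr with ⟨d, hd, hmem⟩
          have hdcs : d ∈ c :: rest :=
            (List.singleton_infix_iff d _).mp ((PySem.Chars.isIn_iff_infix _ _).mp hmem)
          have : (c :: rest).any (['<', '>', ':', '"', '|', '?', '*'].contains ·) = true :=
            List.any_eq_true.mpr ⟨d, hdcs, by simpa using hd⟩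
          rw [this] at hl; exact hl
      · rcases List.any_eq_true.mp hl with ⟨d, hd, hmem⟩
        refine List.any_eq_true.mpr ⟨d, by simpa using hmem, ?_⟩
        exact (PySem.Chars.isIn_iff_infix _ _).mpr ((List.singleton_infix_iff d _).mpr hd)
    rw [hdd, hsw, hdan]
    cases hX : PySem.Chars.isIn ['.', '.'] (c :: rest) <;>
      cases hS : (c == '/') <;>
      cases hA : ((c :: rest).any (['<', '>', ':', '"', '|', '?', '*'].contains ·)) <;>
      simp
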